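-- pv_equiv track=rewrite | github.com/amshrestha2020/CodeSignal | CodeSignal/Core/ContoursShifting.py | solution
-- ===== SOURCE A (Python) =====
-- def solution(matrix):
--     row = 0
--     col = 0
--     max_row = len(matrix)
--     max_col = len(matrix[0])
--
--     while row < max_row and col < max_col:
--         if row == max_row - 1:
--             if col % 2 == 0:
--                 prev = matrix[row][max_col - 1]
--                 for i in range(col, max_col):
--                     current = matrix[row][i]
--                     matrix[row][i] = prev
--                     prev = current
--             else:
--                 prev = matrix[row][col]
--                 for i in range(max_col - 1, col - 1, -1):
--                     current = matrix[row][i]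
--                     matrix[row][i] = prev
--                     prev = current
--             break
--
--         if col == max_col - 1:
--             if row % 2 == 0:
--                 prev = matrix[max_row - 1][col]
--                 for i in range(row, max_row):
--                     current = matrix[i][col]
--                     matrix[i][col] = prev
--                     prev = current
--             else:
--                 prev = matrix[row][col]
--                 for i in range(max_row - 1, row - 1, -1):
--                     current = matrix[i][col]
--                     matrix[i][col] = prev
--                     prev = current
--             break
--
--         if row % 2 == 0 and col % 2 == 0:
--             prev = matrix[row + 1][col]
--             for i in range(col, max_col):
--                 current = matrix[row][i]
--                 matrix[row][i] = prev
--                 prev = current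
--             row += 1
--
--             for i in range(row, max_row):
--                 current = matrix[i][max_col - 1]
--                 matrix[i][max_col - 1] = prev
--                 prev = current
--             max_col -= 1
--
--             for i in range(max_col - 1, col - 1, -1):
--                 current = matrix[max_row - 1][i]
--                 matrix[max_row - 1][i] = prev
--                 prev = current
--             max_row -= 1
--
--             for i in range(max_row - 1, row - 1, -1):
--                 current = matrix[i][col]
--                 matrix[i][col] = prev
--                 prev = current
--             col += 1
--         else:
--             prev = matrix[row][col + 1]
--             for i in range(row, max_row):
--                 current = matrix[i][col]
--                 matrix[i][col] = prev
--                 prev = current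
--             col += 1
--
--             for i in range(col, max_col):
--                 current = matrix[max_row - 1][i]
--                 matrix[max_row - 1][i] = prev
--                 prev = current
--             max_row -= 1
--
--             for i in range(max_row - 1, row - 1, -1):
--                 current = matrix[i][max_col - 1]
--                 matrix[i][max_col - 1] = prev
--                 prev = current
--             max_col -= 1
--
--             for i in range(max_col - 1, col - 1, -1):
--                 current = matrix[row][i]
--                 matrix[row][i] = prev
--                 prev = current
--             row += 1
--
--     return matrix
-- ===== SOURCE B (Python) =====
-- def solution(matrix):
--     n, m = len(matrix), len(matrix[0])
--     k = 0
--     while k < n - k and k < m - k: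
--         t, b, l, r = k, n - 1 - k, k, m - 1 - k
--         if k % 2 == 0:
--             # even layer: values move clockwise; walk the ring clockwise from the top-left
--             coords = [(t, j) for j in range(l, r + 1)]
--             coords += [(i, r) for i in range(t + 1, b + 1)]
--             coords += [(b, j) for j in range(r - 1, l - 1, -1)] if t < b else []
--             coords += [(i, l) for i in range(b - 1, t, -1)] if l < r else []
--         elif t == b:
--             # odd degenerate single-row ring: values move left; walk right-to-left
--             coords = [(t, j) for j in range(r, l - 1, -1)]
--         elif l == r:
--             # odd degenerate single-column ring: values move up; walk bottom-to-top
--             coords = [(i, l) for i in range(b, t - 1, -1)]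
--         else:
--             # odd layer: values move counter-clockwise; walk counter-clockwise from the top-left
--             coords = [(i, l) for i in range(t, b + 1)]
--             coords += [(b, j) for j in range(l + 1, r + 1)]
--             coords += [(i, r) for i in range(b - 1, t - 1, -1)]
--             coords += [(t, j) for j in range(r - 1, l, -1)]
--         vals = [matrix[i][j] for i, j in coords]
--         vals = vals[-1:] + vals[:-1]
--         for (i, j), v in zip(coords, vals):
--             matrix[i][j] = v
--         k += 1
--     return matrix
-- ===== Notes on version B (the rewrite author's own statement) =====
-- stated objective: simpler
-- what changed: Replaces A's twelve interleaved prev-carrying shift loops with bound mutation by one uniform step per layer: collect the ring coordinates clockwise once, cyclically rotate the value list (right for even layers, left for odd), and write it back.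
import Mathlib
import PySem

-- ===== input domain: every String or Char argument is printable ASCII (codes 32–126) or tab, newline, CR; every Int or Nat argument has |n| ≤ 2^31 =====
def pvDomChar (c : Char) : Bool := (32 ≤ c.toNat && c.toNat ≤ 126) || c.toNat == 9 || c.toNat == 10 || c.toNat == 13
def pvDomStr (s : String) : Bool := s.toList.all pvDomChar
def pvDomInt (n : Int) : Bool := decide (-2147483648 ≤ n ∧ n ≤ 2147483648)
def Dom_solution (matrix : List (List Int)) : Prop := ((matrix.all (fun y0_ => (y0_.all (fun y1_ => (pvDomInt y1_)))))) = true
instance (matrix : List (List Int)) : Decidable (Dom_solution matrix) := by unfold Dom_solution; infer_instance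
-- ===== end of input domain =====

-- B replaces A's twelve interleaved prev-carrying shift loops by one uniform step per layer
-- (collect the ring coordinates in the shift direction, rotate the value list by one, write it
-- back); objective: simpler.  Both Pythons mutate the argument in place and return it; the
-- equivalence proved here is about the RETURN value only.

-- ===== PORT A =====
-- matrix[r][c]  (both indices provably in range under Pre_; default only pads the raise case)
def getCell (M : List (List Int)) (r c : Int) : Int :=
  PySem.List.pyGetD (PySem.List.pyGetD M r []) c 0

-- matrix[r][c] = v
def setCell (M : List (List Int)) (r c : Int) (v : Int) : List (List Int) :=
  PySem.List.pySetD M r (PySem.List.pySetD (PySem.List.pyGetD M r []) c v)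

-- A's row-shift loop: for i in idxs: current = matrix[row][i]; matrix[row][i] = prev; prev = current
def rowShift (r : Int) (st : List (List Int) × Int) (idxs : List Int) : List (List Int) × Int :=
  idxs.foldl (fun s i => (setCell s.1 r i s.2, getCell s.1 r i)) st

-- A's column-shift loop: for i in idxs: current = matrix[i][col]; matrix[i][col] = prev; prev = current
def colShift (c : Int) (st : List (List Int) × Int) (idxs : List Int) : List (List Int) × Int :=
  idxs.foldl (fun s i => (setCell s.1 i c s.2, getCell s.1 i c)) st

-- A's while loop, state (row, col, max_row, max_col); the Nat argument is fuel for the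
-- structural encoding of the while loop (matrix.length + 1 always suffices: row grows by
-- one and max_row shrinks by one per iteration)
def loopA : Nat → List (List Int) → Int → Int → Int → Int → List (List Int)
  | 0, M, _, _, _, _ => M
  | fuel + 1, M, row, col, max_row, max_col =>
  if row < max_row ∧ col < max_col then
    if row = max_row - 1 then
      if PySem.Int.mod col 2 = 0 then
        (rowShift row (M, getCell M row (max_col - 1)) (PySem.List.pyRange col max_col 1)).1
      else
        (rowShift row (M, getCell M row col) (PySem.List.pyRange (max_col - 1) (col - 1) (-1))).1
    else if col = max_col - 1 then
      if PySem.Int.mod row 2 = 0 then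
        (colShift col (M, getCell M (max_row - 1) col) (PySem.List.pyRange row max_row 1)).1
      else
        (colShift col (M, getCell M row col) (PySem.List.pyRange (max_row - 1) (row - 1) (-1))).1
    else if PySem.Int.mod row 2 = 0 ∧ PySem.Int.mod col 2 = 0 then
      let s1 := rowShift row (M, getCell M (row + 1) col) (PySem.List.pyRange col max_col 1)
      let row1 := row + 1
      let s2 := colShift (max_col - 1) s1 (PySem.List.pyRange row1 max_row 1)
      let mc1 := max_col - 1
      let s3 := rowShift (max_row - 1) s2 (PySem.List.pyRange (mc1 - 1) (col - 1) (-1))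
      let mr1 := max_row - 1
      let s4 := colShift col s3 (PySem.List.pyRange (mr1 - 1) (row1 - 1) (-1))
      loopA fuel s4.1 row1 (col + 1) mr1 mc1
    else
      let s1 := colShift col (M, getCell M row (col + 1)) (PySem.List.pyRange row max_row 1)
      let col1 := col + 1
      let s2 := rowShift (max_row - 1) s1 (PySem.List.pyRange col1 max_col 1)
      let mr1 := max_row - 1
      let s3 := colShift (max_col - 1) s2 (PySem.List.pyRange (mr1 - 1) (row - 1) (-1))
      let mc1 := max_col - 1
      let s4 := rowShift row s3 (PySem.List.pyRange (mc1 - 1) (col1 - 1) (-1))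
      loopA fuel s4.1 (row + 1) col1 mr1 mc1
  else M

def solution (matrix : List (List Int)) : List (List Int) :=
  loopA (matrix.length + 1) matrix 0 0 (matrix.length : Int)
    ((PySem.List.pyGetD matrix 0 []).length : Int)

-- ===== PORT B =====
-- for (i, j), v in zip(coords, vals): matrix[i][j] = v
def writeBack (M : List (List Int)) (pairs : List ((Int × Int) × Int)) : List (List Int) :=
  pairs.foldl (fun acc x => setCell acc x.1.1 x.1.2 x.2) M

-- B's while loop over the layer index k; the Nat argument is fuel for the structural
-- encoding of the while loop (matrix.length + 1 always suffices)
def loopB : Nat → List (List Int) → Int → Int → Int → List (List Int)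
  | 0, M, _, _, _ => M
  | fuel + 1, M, n, m, k =>
  if k < n - k ∧ k < m - k then
    let t := k; let b := n - 1 - k; let l := k; let r := m - 1 - k
    let coords : List (Int × Int) :=
      if PySem.Int.mod k 2 = 0 then
        (PySem.List.pyRange l (r + 1) 1).map (fun j => (t, j)) ++
        (PySem.List.pyRange (t + 1) (b + 1) 1).map (fun i => (i, r)) ++
        (if t < b then (PySem.List.pyRange (r - 1) (l - 1) (-1)).map (fun j => (b, j)) else []) ++
        (if l < r then (PySem.List.pyRange (b - 1) t (-1)).map (fun i => (i, l)) else [])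
      else if t = b then
        (PySem.List.pyRange r (l - 1) (-1)).map (fun j => (t, j))
      else if l = r then
        (PySem.List.pyRange b (t - 1) (-1)).map (fun i => (i, l))
      else
        (PySem.List.pyRange t (b + 1) 1).map (fun i => (i, l)) ++
        (PySem.List.pyRange (l + 1) (r + 1) 1).map (fun j => (b, j)) ++
        (PySem.List.pyRange (b - 1) (t - 1) (-1)).map (fun i => (i, r)) ++
        (PySem.List.pyRange (r - 1) l (-1)).map (fun j => (t, j))
    let vals := coords.map (fun p => getCell M p.1 p.2)
    let vals2 := PySem.List.slice vals (some (-1)) none ++ PySem.List.slice vals none (some (-1))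
    loopB fuel (writeBack M (coords.zip vals2)) n m (k + 1)
  else M

def solution_alt (matrix : List (List Int)) : List (List Int) :=
  loopB (matrix.length + 1) matrix (matrix.length : Int)
    ((PySem.List.pyGetD matrix 0 []).length : Int) 0

-- ===== PRECONDITION & SPEC =====
-- Pre_ excludes exactly the inputs on which A raises: the empty matrix (len(matrix[0]) is an
-- IndexError) and matrices with a row shorter than row 0 (an in-place shift indexes it out of
-- range).  Rows longer than row 0 are admitted (A returns, leaving the overhang untouched).
def Pre_solution (matrix : List (List Int)) : Prop :=
  matrix ≠ [] ∧ ∀ row ∈ matrix, (matrix.headD []).length ≤ row.length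
instance (matrix : List (List Int)) : Decidable (Pre_solution matrix) := by
  unfold Pre_solution; infer_instance

def pvWitness_solution : List (List Int) := [[1, 2, 3], [4, 5, 6], [7, 8, 9]]

def Spec_solution (matrix : List (List Int)) (out : List (List Int)) : Prop := out = solution_alt matrix
instance (matrix : List (List Int)) (out : List (List Int)) : Decidable (Spec_solution matrix out) := by unfold Spec_solution; infer_instance

-- ===== CLAIM (what is proved, stated in full; the proofs are below) =====
def Claim_equal_solution : Prop := ∀ (matrix : List (List Int)), Dom_solution matrix → Pre_solution matrix → Spec_solution matrix (solution matrix)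

-- ===== LEMMAS AND PROOFS =====

-- a position (r, c) indexes M in range
def InR (M : List (List Int)) (q : Int × Int) : Prop :=
  0 ≤ q.1 ∧ q.1 < (M.length : Int) ∧ 0 ≤ q.2 ∧ q.2 < ((PySem.List.pyGetD M q.1 []).length : Int)

-- A's prev-carrying shift over an arbitrary list of positions
def chainWrite (ps : List (Int × Int)) (st : List (List Int) × Int) : List (List Int) × Int :=
  ps.foldl (fun s q => (setCell s.1 q.1 q.2 s.2, getCell s.1 q.1 q.2)) st

def readC (M : List (List Int)) (q : Int × Int) : Int := getCell M q.1 q.2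

theorem pyGetD_nonneg' {α : Type} (xs : List α) (i : Int) (d : α) (h : 0 ≤ i) :
    PySem.List.pyGetD xs i d = xs.getD i.toNat d := by
  simp [PySem.List.pyGetD, PySem.List.pyGet?_of_nonneg xs h, List.getD_eq_getElem?_getD]

theorem getD_set' {α : Type} (l : List α) (i j : Nat) (a : α) (d : α) :
    (l.set i a).getD j d = if i = j ∧ i < l.length then a else l.getD j d := by
  rw [List.getD_eq_getElem?_getD, List.getElem?_set, List.getD_eq_getElem?_getD]
  split_ifs with h1 h2 h3 <;> simp_all <;> omega
theorem length_setCell (M : List (List Int)) (r c : Int) (v : Int) :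
    (setCell M r c v).length = M.length := by
  simp [setCell, PySem.List.length_pySetD]

theorem rowlen_setCell (M : List (List Int)) (r c v i : Int) (hr : 0 ≤ r) (hi : 0 ≤ i) :
    ((PySem.List.pyGetD (setCell M r c v) i []).length) = (PySem.List.pyGetD M i []).length := by
  simp only [setCell, PySem.List.pySetD_of_nonneg _ _ hr, pyGetD_nonneg' _ _ _ hr,
    pyGetD_nonneg' _ _ _ hi, getD_set']
  split_ifs with h
  · rw [PySem.List.length_pySetD, h.1]
  · rfl
theorem getCell_setCell_ne (M : List (List Int)) (r c v : Int) (q : Int × Int)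
    (hr : 0 ≤ r) (hc : 0 ≤ c) (hq0 : 0 ≤ q.1) (hqc0 : 0 ≤ q.2) (hne : q ≠ (r, c)) :
    getCell (setCell M r c v) q.1 q.2 = getCell M q.1 q.2 := by
  obtain ⟨i, j⟩ := q
  replace hq0 : 0 ≤ i := hq0
  replace hqc0 : 0 ≤ j := hqc0
  simp only [ne_eq, Prod.mk.injEq, not_and] at hne
  simp only [getCell, setCell, PySem.List.pySetD_of_nonneg _ _ hr,
    PySem.List.pySetD_of_nonneg _ _ hc, pyGetD_nonneg' _ _ _ hr,
    pyGetD_nonneg' _ _ _ hq0, pyGetD_nonneg' _ _ _ hqc0, pyGetD_nonneg' _ _ _ hc, getD_set']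
  split_ifs with h1
  · have hir : i = r := by omega
    have hjc : j ≠ c := hne hir
    rw [getD_set', if_neg (by omega), hir]
  · rfl
theorem InR_setCell (M : List (List Int)) (r c v : Int) (q : Int × Int)
    (hr : 0 ≤ r) : InR (setCell M r c v) q ↔ InR M q := by
  unfold InR
  by_cases hq : 0 ≤ q.1
  · rw [length_setCell, rowlen_setCell _ _ _ _ _ hr hq]
  · constructor <;> (rintro ⟨h1, -⟩; omega)
theorem writeBack_cons (M : List (List Int)) (q : Int × Int) (v : Int)
    (l : List ((Int × Int) × Int)) :
    writeBack M ((q, v) :: l) = writeBack (setCell M q.1 q.2 v) l := rfl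

theorem chain_eq_writeBack (ps : List (Int × Int)) (M : List (List Int)) (p0 : Int)
    (hnd : ps.Nodup) (hir : ∀ q ∈ ps, InR M q) :
    chainWrite ps (M, p0) =
      (writeBack M (ps.zip (p0 :: ps.map (readC M))), (ps.map (readC M)).getLastD p0) := by
  induction ps generalizing M p0 with
  | nil => simp [chainWrite, writeBack]
  | cons q tl ih =>
    have hq : InR M q := hir q (by simp)
    have hqr : 0 ≤ q.1 := hq.1
    have hqc : 0 ≤ q.2 := hq.2.2.1
    have hchain : chainWrite (q :: tl) (M, p0)
        = chainWrite tl (setCell M q.1 q.2 p0, getCell M q.1 q.2) := rfl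
    have hnd' : tl.Nodup := hnd.of_cons
    have hqnot : q ∉ tl := by simp [List.nodup_cons] at hnd; exact hnd.1
    have hir' : ∀ p ∈ tl, InR (setCell M q.1 q.2 p0) p := by
      intro p hp; exact (InR_setCell _ _ _ _ _ hqr).mpr (hir p (by simp [hp]))
    rw [hchain, ih _ _ hnd' hir']
    have hmap : tl.map (readC (setCell M q.1 q.2 p0)) = tl.map (readC M) := by
      apply List.map_congr_left
      intro p hp
      have hpI : InR M p := hir p (by simp [hp])
      exact getCell_setCell_ne M q.1 q.2 p0 p hqr hqc hpI.1 hpI.2.2.1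
        (by rintro rfl; exact hqnot hp)
    rw [hmap]
    apply Prod.ext
    · show writeBack (setCell M q.1 q.2 p0) (tl.zip (getCell M q.1 q.2 :: tl.map (readC M)))
        = writeBack M ((q :: tl).zip (p0 :: (q :: tl).map (readC M)))
      rw [List.map_cons, List.zip_cons_cons, writeBack_cons]
      rfl
    · show (tl.map (readC M)).getLastD (getCell M q.1 q.2)
        = ((q :: tl).map (readC M)).getLastD p0
      rw [List.map_cons, List.getLastD_cons]
      rfl
theorem zip_trunc {α β : Type} (ps : List α) (x : β) (vs : List β)
    (h : vs.length = ps.length) : ps.zip (x :: vs) = ps.zip (x :: vs.dropLast) := by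
  induction ps generalizing x vs with
  | nil => rfl
  | cons q tl ih =>
    cases vs with
    | nil => simp at h
    | cons v vt =>
      cases vt with
      | nil =>
        cases tl with
        | nil => rfl
        | cons a b => simp at h
      | cons v2 vt2 =>
        rw [List.zip_cons_cons, List.dropLast_cons_of_ne_nil (by simp), List.zip_cons_cons,
          ih v (v2 :: vt2) (by simpa using h)]

theorem getLastD_append' {α : Type} (xs ys : List α) (d : α) (h : ys ≠ []) :
    (xs ++ ys).getLastD d = ys.getLastD d := by
  cases hl : ys.getLast? with
  | none => exact absurd (List.getLast?_eq_none_iff.mp hl) h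
  | some y => simp [List.getLastD_eq_getLast?, List.getLast?_append, hl]

theorem drop_len_sub_one {α : Type} (xs : List α) (h : xs ≠ []) (d : α) :
    xs.drop (xs.length - 1) = [xs.getLastD d] := by
  induction xs with
  | nil => simp at h
  | cons x t ih =>
    cases t with
    | nil => simp
    | cons y t2 => simpa using ih (by simp) 


theorem rowShift_eq_chain (r : Int) (st : List (List Int) × Int) (idxs : List Int) :
    rowShift r st idxs = chainWrite (idxs.map (fun i => (r, i))) st := by
  simp [rowShift, chainWrite, List.foldl_map]

theorem colShift_eq_chain (c : Int) (st : List (List Int) × Int) (idxs : List Int) :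
    colShift c st idxs = chainWrite (idxs.map (fun i => (i, c))) st := by
  simp [colShift, chainWrite, List.foldl_map]

theorem chainWrite_append (a b : List (Int × Int)) (st : List (List Int) × Int) :
    chainWrite (a ++ b) st = chainWrite b (chainWrite a st) := by
  simp [chainWrite, List.foldl_append]

theorem writeBack_length (pairs : List ((Int × Int) × Int)) (M : List (List Int)) :
    (writeBack M pairs).length = M.length := by
  induction pairs generalizing M with
  | nil => rfl
  | cons x l ih =>
    obtain ⟨q, v⟩ := x
    rw [writeBack_cons, ih, length_setCell]

theorem writeBack_rowlen (pairs : List ((Int × Int) × Int)) (M : List (List Int)) (i : Int)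
    (hi : 0 ≤ i) (h : ∀ x ∈ pairs, 0 ≤ x.1.1) :
    (PySem.List.pyGetD (writeBack M pairs) i []).length = (PySem.List.pyGetD M i []).length := by
  induction pairs generalizing M with
  | nil => rfl
  | cons x l ih =>
    obtain ⟨q, v⟩ := x
    rw [writeBack_cons, ih _ (fun y hy => h y (by simp [hy])),
      rowlen_setCell _ _ _ _ _ (h (q, v) (by simp)) hi]

theorem bound_transfer (M M' : List (List Int)) (m : Int)
    (hlen : M'.length = M.length)
    (hrow : ∀ i : Int, 0 ≤ i → (PySem.List.pyGetD M' i []).length = (PySem.List.pyGetD M i []).length)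
    (hb : ∀ row ∈ M, m ≤ (row.length : Int)) :
    ∀ row ∈ M', m ≤ (row.length : Int) := by
  intro row hrowmem
  obtain ⟨k, hk, rfl⟩ := List.mem_iff_getElem.mp hrowmem
  have h1 := hrow (k : Int) (by positivity)
  rw [pyGetD_nonneg' _ _ _ (by positivity), pyGetD_nonneg' _ _ _ (by positivity)] at h1
  simp only [Int.toNat_natCast] at h1
  rw [List.getD_eq_getElem?_getD, List.getElem?_eq_getElem hk] at h1
  have hkM : k < M.length := by omega
  rw [List.getD_eq_getElem?_getD, List.getElem?_eq_getElem hkM] at h1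
  simp only [Option.getD_some] at h1
  rw [h1]
  exact hb _ (List.getElem_mem hkM)

-- ring segments
def segRowF (r a b : Int) : List (Int × Int) := (PySem.List.pyRange a b 1).map (fun i => (r, i))
def segRowB (r a b : Int) : List (Int × Int) := (PySem.List.pyRange a b (-1)).map (fun i => (r, i))
def segColF (c a b : Int) : List (Int × Int) := (PySem.List.pyRange a b 1).map (fun i => (i, c))
def segColB (c a b : Int) : List (Int × Int) := (PySem.List.pyRange a b (-1)).map (fun i => (i, c))

theorem mem_segRowF (q : Int × Int) (r a b : Int) :
    q ∈ segRowF r a b ↔ q.1 = r ∧ a ≤ q.2 ∧ q.2 < b := by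
  obtain ⟨x, y⟩ := q
  simp [segRowF, List.mem_map, PySem.List.mem_pyRange_one, eq_comm, and_comm, and_left_comm]

theorem mem_segRowB (q : Int × Int) (r a b : Int) :
    q ∈ segRowB r a b ↔ q.1 = r ∧ b < q.2 ∧ q.2 ≤ a := by
  obtain ⟨x, y⟩ := q
  simp [segRowB, List.mem_map, PySem.List.mem_pyRange_neg_one, eq_comm, and_comm, and_left_comm]

theorem mem_segColF (q : Int × Int) (c a b : Int) :
    q ∈ segColF c a b ↔ q.2 = c ∧ a ≤ q.1 ∧ q.1 < b := by
  obtain ⟨x, y⟩ := q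
  simp [segColF, List.mem_map, PySem.List.mem_pyRange_one, eq_comm, and_comm, and_left_comm]

theorem mem_segColB (q : Int × Int) (c a b : Int) :
    q ∈ segColB c a b ↔ q.2 = c ∧ b < q.1 ∧ q.1 ≤ a := by
  obtain ⟨x, y⟩ := q
  simp [segColB, List.mem_map, PySem.List.mem_pyRange_neg_one, eq_comm, and_comm, and_left_comm]

theorem nodup_pyRange_neg_one' (a b : Int) : (PySem.List.pyRange a b (-1)).Nodup := by
  rw [PySem.List.pyRange_neg_one_eq_reverse, List.nodup_reverse]
  exact PySem.List.nodup_pyRange_one _ _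

theorem nodup_segRowF (r a b : Int) : (segRowF r a b).Nodup :=
  (PySem.List.nodup_pyRange_one a b).map (fun x y h => by simpa using h)

theorem nodup_segRowB (r a b : Int) : (segRowB r a b).Nodup :=
  (nodup_pyRange_neg_one' a b).map (fun x y h => by simpa using h)

theorem nodup_segColF (c a b : Int) : (segColF c a b).Nodup :=
  (PySem.List.nodup_pyRange_one a b).map (fun x y h => by simpa using h)

theorem nodup_segColB (c a b : Int) : (segColB c a b).Nodup :=
  (nodup_pyRange_neg_one' a b).map (fun x y h => by simpa using h)

theorem getLastD_segF {α : Type} (f : Int → α) (a b : Int) (h : a < b) (d : α) :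
    ((PySem.List.pyRange a b 1).map f).getLastD d = f (b - 1) := by
  have hb : b = (b - 1) + 1 := by ring
  rw [hb, PySem.List.pyRange_one_succ_right (by omega), List.map_append]
  rw [getLastD_append' _ _ _ (by simp)]
  simp

theorem getLastD_segB {α : Type} (f : Int → α) (a b : Int) (h : b < a) (d : α) :
    ((PySem.List.pyRange a b (-1)).map f).getLastD d = f (b + 1) := by
  rw [PySem.List.pyRange_neg_one_eq_reverse, List.map_reverse]
  have hrev : ∀ (xs : List α), (xs.reverse).getLastD d = xs.headD d := by
    intro xs; cases xs <;> simp
  rw [hrev, PySem.List.pyRange_one_cons (by omega : b + 1 < a + 1)]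
  simp

theorem loopB_stop (t : Nat) (M : List (List Int)) (n m k : Int)
    (h : ¬ (k < n - k ∧ k < m - k)) : loopB t M n m k = M := by
  cases t with
  | zero => rfl
  | succ t => simp only [loopB, if_neg h]

theorem InR_of_bounds (M : List (List Int)) (n m : Int) (hlen : (M.length : Int) = n)
    (hb : ∀ row ∈ M, (m : Int) ≤ (row.length : Int)) (q : Int × Int)
    (h1 : 0 ≤ q.1) (h2 : q.1 < n) (h3 : 0 ≤ q.2) (h4 : q.2 < m) : InR M q := by
  have hql : PySem.Raise.InRange M.length q.1 := by unfold PySem.Raise.InRange; omega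
  have hmem : PySem.List.pyGetD M q.1 [] ∈ M := PySem.List.pyGetD_mem M [] hql
  exact ⟨h1, by omega, h3, by have := hb _ hmem; omega⟩

theorem main_loop (n m : Int) : ∀ (t : Nat) (j : Int) (M : List (List Int)),
    (n - j).toNat ≤ t → 0 ≤ j → (M.length : Int) = n →
    (∀ row ∈ M, (m : Int) ≤ (row.length : Int)) →
    loopA t M j j (n - j) (m - j) = loopB t M n m j := by
  intro t
  induction t with
  | zero => intro j M ht hj hlen hb; rfl
  | succ t ih =>
    intro j M ht hj hlen hb
    by_cases hg : j < n - j ∧ j < m - j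
    · simp only [loopA, loopB]
      rw [if_pos hg, if_pos hg]
      by_cases hrow1 : j = n - j - 1
      · -- A's single-row break branch; B does this ring and stops next iteration
        rw [if_pos hrow1]
        rw [loopB_stop t _ n m (j + 1) (by omega)]
        by_cases hpar : PySem.Int.mod j 2 = 0
        · -- single row, even layer: both walk left-to-right
          rw [if_pos hpar, if_pos hpar]
          rw [show n - 1 - j = j from by omega]
          rw [PySem.List.pyRange_one_eq_nil (by omega : (j : Int) + 1 ≤ j + 1)]
          rw [if_neg (by omega : ¬ ((j : Int) < j))]
          rw [PySem.List.pyRange_neg_one_eq_nil (by omega : (j : Int) - 1 ≤ j)]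
          simp only [List.map_nil, List.append_nil, ite_self]
          rw [show m - 1 - j + 1 = m - j from by omega]
          rw [PySem.List.slice_from_neg_one, PySem.List.slice_to_neg_one]
          rw [show (fun p : Int × Int => getCell M p.1 p.2) = readC M from rfl]
          rw [drop_len_sub_one _ (by
            apply List.ne_nil_of_length_pos
            simp [PySem.List.length_pyRange_one]
            omega) (0 : Int)]
          rw [List.singleton_append]
          rw [rowShift_eq_chain]
          have hir : ∀ q ∈ (PySem.List.pyRange j (m - j) 1).map (fun i => ((j : Int), i)), InR M q := by
            intro q hq
            have hq' := (mem_segRowF q j j (m - j)).mp hq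
            exact InR_of_bounds M n m hlen hb q (by omega) (by omega) (by omega) (by omega)
          rw [chain_eq_writeBack ((PySem.List.pyRange j (m - j) 1).map (fun i => ((j : Int), i))) M (getCell M j (m - j - 1)) (nodup_segRowF j j (m - j)) hir]
          dsimp only
          rw [zip_trunc _ _ _ (by simp)]
          rw [List.map_map]
          rw [getLastD_segF (readC M ∘ fun i => ((j : Int), i)) j (m - j) (by omega) 0]
          rfl
        · -- single row, odd layer: both walk right-to-left
          rw [if_neg hpar, if_neg hpar, if_pos (show (j : Int) = n - 1 - j from by omega)]
          rw [show m - 1 - j = m - j - 1 from by omega]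
          rw [PySem.List.slice_from_neg_one, PySem.List.slice_to_neg_one]
          rw [show (fun p : Int × Int => getCell M p.1 p.2) = readC M from rfl]
          rw [drop_len_sub_one _ (by
            apply List.ne_nil_of_length_pos
            simp [PySem.List.length_pyRange_neg_one]
            omega) (0 : Int)]
          rw [List.singleton_append]
          rw [rowShift_eq_chain]
          have hir : ∀ q ∈ (PySem.List.pyRange (m - j - 1) (j - 1) (-1)).map (fun i => ((j : Int), i)), InR M q := by
            intro q hq
            have hq' := (mem_segRowB q j (m - j - 1) (j - 1)).mp hq
            exact InR_of_bounds M n m hlen hb q (by omega) (by omega) (by omega) (by omega)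
          rw [chain_eq_writeBack ((PySem.List.pyRange (m - j - 1) (j - 1) (-1)).map (fun i => ((j : Int), i))) M (getCell M j j) (nodup_segRowB j (m - j - 1) (j - 1)) hir]
          dsimp only
          rw [zip_trunc _ _ _ (by simp)]
          rw [List.map_map]
          rw [getLastD_segB (readC M ∘ fun i => ((j : Int), i)) (m - j - 1) (j - 1) (by omega) 0]
          rw [show (j : Int) - 1 + 1 = j from by omega]
          rfl
      · rw [if_neg hrow1]
        by_cases hcol1 : j = m - j - 1
        · -- A's single-column break branch
          rw [if_pos hcol1]
          rw [loopB_stop t _ n m (j + 1) (by omega)]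
          by_cases hpar : PySem.Int.mod j 2 = 0
          · -- single column, even layer: both walk top-to-bottom
            rw [if_pos hpar, if_pos hpar]
            rw [show m - 1 - j = j from by omega]
            rw [show n - 1 - j + 1 = n - j from by omega]
            rw [show n - 1 - j = n - j - 1 from by omega]
            rw [PySem.List.pyRange_one_singleton]
            simp only [List.map_cons, List.map_nil]
            rw [PySem.List.pyRange_neg_one_eq_nil (by omega : (j : Int) - 1 ≤ j - 1)]
            simp only [List.map_nil, ite_self]
            rw [if_neg (by omega : ¬ ((j : Int) < j))]
            simp only [List.append_nil, List.singleton_append]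
            have hco : ((j, j) :: List.map (fun i => (i, j)) (PySem.List.pyRange (j + 1) (n - j) 1) : List (Int × Int)) = List.map (fun i => (i, (j : Int))) (PySem.List.pyRange j (n - j) 1) := by
              rw [PySem.List.pyRange_one_cons (by omega : j < n - j), List.map_cons]
            rw [hco]
            rw [PySem.List.slice_from_neg_one, PySem.List.slice_to_neg_one]
            rw [show (fun p : Int × Int => getCell M p.1 p.2) = readC M from rfl]
            rw [drop_len_sub_one _ (by
              apply List.ne_nil_of_length_pos
              simp [PySem.List.length_pyRange_one]
              omega) (0 : Int)]
            rw [List.singleton_append]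
            rw [colShift_eq_chain]
            have hir : ∀ q ∈ (PySem.List.pyRange j (n - j) 1).map (fun i => (i, (j : Int))), InR M q := by
              intro q hq
              have hq' := (mem_segColF q j j (n - j)).mp hq
              exact InR_of_bounds M n m hlen hb q (by omega) (by omega) (by omega) (by omega)
            rw [chain_eq_writeBack ((PySem.List.pyRange j (n - j) 1).map (fun i => (i, (j : Int)))) M (getCell M (n - j - 1) j) (nodup_segColF j j (n - j)) hir]
            dsimp only
            rw [zip_trunc _ _ _ (by simp)]
            rw [List.map_map]
            rw [getLastD_segF (readC M ∘ fun i => (i, (j : Int))) j (n - j) (by omega) 0]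
            rfl
          · -- single column, odd layer: both walk bottom-to-top
            rw [if_neg hpar, if_neg hpar, if_neg (by omega : ¬ ((j : Int) = n - 1 - j)), if_pos (show (j : Int) = m - 1 - j from by omega)]
            rw [show n - 1 - j = n - j - 1 from by omega]
            rw [PySem.List.slice_from_neg_one, PySem.List.slice_to_neg_one]
            rw [show (fun p : Int × Int => getCell M p.1 p.2) = readC M from rfl]
            rw [drop_len_sub_one _ (by
              apply List.ne_nil_of_length_pos
              simp [PySem.List.length_pyRange_neg_one]
              omega) (0 : Int)]
            rw [List.singleton_append]
            rw [colShift_eq_chain]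
            have hir : ∀ q ∈ (PySem.List.pyRange (n - j - 1) (j - 1) (-1)).map (fun i => (i, (j : Int))), InR M q := by
              intro q hq
              have hq' := (mem_segColB q j (n - j - 1) (j - 1)).mp hq
              exact InR_of_bounds M n m hlen hb q (by omega) (by omega) (by omega) (by omega)
            rw [chain_eq_writeBack ((PySem.List.pyRange (n - j - 1) (j - 1) (-1)).map (fun i => (i, (j : Int)))) M (getCell M j j) (nodup_segColB j (n - j - 1) (j - 1)) hir]
            dsimp only
            rw [zip_trunc _ _ _ (by simp)]
            rw [List.map_map]
            rw [getLastD_segB (readC M ∘ fun i => (i, (j : Int))) (n - j - 1) (j - 1) (by omega) 0]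
            rw [show (j : Int) - 1 + 1 = j from by omega]
            rfl
        · -- full rings
          by_cases hpar : PySem.Int.mod j 2 = 0
          · -- full ring, even layer: clockwise
            rw [if_neg hcol1, if_pos (⟨hpar, hpar⟩ : PySem.Int.mod j 2 = 0 ∧ PySem.Int.mod j 2 = 0), if_pos hpar]
            rw [show m - 1 - j + 1 = m - j from by omega, show n - 1 - j + 1 = n - j from by omega,
              show m - 1 - j = m - j - 1 from by omega, show n - 1 - j = n - j - 1 from by omega]
            rw [if_pos (by omega : (j : Int) < n - j - 1), if_pos (by omega : (j : Int) < m - j - 1)]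
            rw [show (j : Int) + 1 - 1 = j from by omega]
            simp only [rowShift_eq_chain, colShift_eq_chain]
            simp only [← chainWrite_append]
            simp only [List.append_assoc]
            have hd34 : List.Disjoint (segRowB (n - j - 1) (m - j - 1 - 1) (j - 1)) (segColB j (n - j - 1 - 1) j) := by
              intro q h1 h2
              have a1 := (mem_segRowB q _ _ _).mp h1
              have a2 := (mem_segColB q _ _ _).mp h2
              omega
            have hd234 : List.Disjoint (segColF (m - j - 1) (j + 1) (n - j)) (segRowB (n - j - 1) (m - j - 1 - 1) (j - 1) ++ segColB j (n - j - 1 - 1) j) := by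
              intro q h1 h2
              have a1 := (mem_segColF q _ _ _).mp h1
              rcases List.mem_append.mp h2 with h | h
              · have a2 := (mem_segRowB q _ _ _).mp h; omega
              · have a2 := (mem_segColB q _ _ _).mp h; omega
            have hd1234 : List.Disjoint (segRowF j j (m - j)) (segColF (m - j - 1) (j + 1) (n - j) ++ (segRowB (n - j - 1) (m - j - 1 - 1) (j - 1) ++ segColB j (n - j - 1 - 1) j)) := by
              intro q h1 h2
              have a1 := (mem_segRowF q _ _ _).mp h1
              rcases List.mem_append.mp h2 with h | h
              · have a2 := (mem_segColF q _ _ _).mp h; omega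
              · rcases List.mem_append.mp h with h' | h'
                · have a2 := (mem_segRowB q _ _ _).mp h'; omega
                · have a2 := (mem_segColB q _ _ _).mp h'; omega
            have hnd : (segRowF j j (m - j) ++ (segColF (m - j - 1) (j + 1) (n - j) ++ (segRowB (n - j - 1) (m - j - 1 - 1) (j - 1) ++ segColB j (n - j - 1 - 1) j))).Nodup :=
              (nodup_segRowF j j (m - j)).append
                ((nodup_segColF (m - j - 1) (j + 1) (n - j)).append
                  ((nodup_segRowB (n - j - 1) (m - j - 1 - 1) (j - 1)).append
                    (nodup_segColB j (n - j - 1 - 1) j) hd34) hd234) hd1234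
            have hir : ∀ q ∈ segRowF j j (m - j) ++ (segColF (m - j - 1) (j + 1) (n - j) ++ (segRowB (n - j - 1) (m - j - 1 - 1) (j - 1) ++ segColB j (n - j - 1 - 1) j)), InR M q := by
              intro q hq
              rcases List.mem_append.mp hq with h | h
              · have a := (mem_segRowF q _ _ _).mp h
                exact InR_of_bounds M n m hlen hb q (by omega) (by omega) (by omega) (by omega)
              · rcases List.mem_append.mp h with h' | h'
                · have a := (mem_segColF q _ _ _).mp h'
                  exact InR_of_bounds M n m hlen hb q (by omega) (by omega) (by omega) (by omega)
                · rcases List.mem_append.mp h' with h'' | h''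
                  · have a := (mem_segRowB q _ _ _).mp h''
                    exact InR_of_bounds M n m hlen hb q (by omega) (by omega) (by omega) (by omega)
                  · have a := (mem_segColB q _ _ _).mp h''
                    exact InR_of_bounds M n m hlen hb q (by omega) (by omega) (by omega) (by omega)
            rw [show (fun p : Int × Int => getCell M p.1 p.2) = readC M from rfl]
            rw [PySem.List.slice_from_neg_one, PySem.List.slice_to_neg_one]
            rw [drop_len_sub_one _ (by
              apply List.ne_nil_of_length_pos
              simp [PySem.List.length_pyRange_one, PySem.List.length_pyRange_neg_one]
              omega) (0 : Int)]
            rw [List.singleton_append]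
            rw [chain_eq_writeBack (List.map (fun i => ((j : Int), i)) (PySem.List.pyRange j (m - j) 1) ++ (List.map (fun i => (i, m - j - 1)) (PySem.List.pyRange (j + 1) (n - j) 1) ++ (List.map (fun i => ((n - j - 1 : Int), i)) (PySem.List.pyRange (m - j - 1 - 1) (j - 1) (-1)) ++ List.map (fun i => (i, (j : Int))) (PySem.List.pyRange (n - j - 1 - 1) j (-1))))) M (getCell M (j + 1) j) hnd hir]
            dsimp only
            rw [zip_trunc _ _ _ (by simp)]
            have hlast : ((List.map (fun i => ((j : Int), i)) (PySem.List.pyRange j (m - j) 1) ++ (List.map (fun i => (i, m - j - 1)) (PySem.List.pyRange (j + 1) (n - j) 1) ++ (List.map (fun i => ((n - j - 1 : Int), i)) (PySem.List.pyRange (m - j - 1 - 1) (j - 1) (-1)) ++ List.map (fun i => (i, (j : Int))) (PySem.List.pyRange (n - j - 1 - 1) j (-1))))).map (readC M)).getLastD 0 = getCell M (j + 1) j := by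
              rw [List.map_append, getLastD_append' _ _ _ (by
                apply List.ne_nil_of_length_pos
                simp [PySem.List.length_pyRange_one, PySem.List.length_pyRange_neg_one]
                omega)]
              rw [List.map_append, getLastD_append' _ _ _ (by
                apply List.ne_nil_of_length_pos
                simp [PySem.List.length_pyRange_one, PySem.List.length_pyRange_neg_one]
                omega)]
              rw [List.map_append]
              by_cases hS4 : j < n - j - 2
              · rw [getLastD_append' _ _ _ (by
                  apply List.ne_nil_of_length_pos
                  simp [PySem.List.length_pyRange_neg_one]
                  omega)]
                rw [List.map_map, getLastD_segB (readC M ∘ fun i => (i, (j : Int))) (n - j - 1 - 1) j (by omega) 0]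
                rfl
              · rw [PySem.List.pyRange_neg_one_eq_nil (by omega : n - j - 1 - 1 ≤ j)]
                simp only [List.map_nil, List.append_nil]
                rw [List.map_map, getLastD_segB (readC M ∘ fun i => ((n - j - 1 : Int), i)) (m - j - 1 - 1) (j - 1) (by omega) 0]
                simp only [Function.comp_apply]
                rw [show (j : Int) - 1 + 1 = j from by omega, show n - j - 1 = j + 1 from by omega]
                rfl
            rw [hlast]
            rw [show n - j - 1 = n - (j + 1) from by ring, show m - j - 1 = m - (j + 1) from by ring]
            apply ih (j + 1) _ (by omega) (by omega)
            · rw [writeBack_length]; exact hlen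
            · refine bound_transfer M _ m (writeBack_length _ _) (fun i hi => writeBack_rowlen _ _ _ hi ?_) hb
              rintro ⟨q, v⟩ hx
              show 0 ≤ q.1
              have hx1 := (List.of_mem_zip hx).1
              rcases List.mem_append.mp hx1 with h | h
              · have a := (mem_segRowF q _ _ _).mp h; omega
              · rcases List.mem_append.mp h with h' | h'
                · have a := (mem_segColF q _ _ _).mp h'; omega
                · rcases List.mem_append.mp h' with h'' | h''
                  · have a := (mem_segRowB q _ _ _).mp h''; omega
                  · have a := (mem_segColB q _ _ _).mp h''; omega
          · -- full ring, odd layer: counter-clockwise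
            rw [if_neg hcol1, if_neg (show ¬ (PySem.Int.mod j 2 = 0 ∧ PySem.Int.mod j 2 = 0) from fun hp => hpar hp.1)]
            rw [if_neg hpar, if_neg (by omega : ¬ ((j : Int) = n - 1 - j)), if_neg (by omega : ¬ ((j : Int) = m - 1 - j))]
            rw [show m - 1 - j + 1 = m - j from by omega, show n - 1 - j + 1 = n - j from by omega,
              show m - 1 - j = m - j - 1 from by omega, show n - 1 - j = n - j - 1 from by omega]
            rw [show (j : Int) + 1 - 1 = j from by omega]
            simp only [rowShift_eq_chain, colShift_eq_chain]
            simp only [← chainWrite_append]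
            simp only [List.append_assoc]
            have hd34 : List.Disjoint (segColB (m - j - 1) (n - j - 1 - 1) (j - 1)) (segRowB j (m - j - 1 - 1) j) := by
              intro q h1 h2
              have a1 := (mem_segColB q _ _ _).mp h1
              have a2 := (mem_segRowB q _ _ _).mp h2
              omega
            have hd234 : List.Disjoint (segRowF (n - j - 1) (j + 1) (m - j)) (segColB (m - j - 1) (n - j - 1 - 1) (j - 1) ++ segRowB j (m - j - 1 - 1) j) := by
              intro q h1 h2
              have a1 := (mem_segRowF q _ _ _).mp h1
              rcases List.mem_append.mp h2 with h | h
              · have a2 := (mem_segColB q _ _ _).mp h; omega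
              · have a2 := (mem_segRowB q _ _ _).mp h; omega
            have hd1234 : List.Disjoint (segColF j j (n - j)) (segRowF (n - j - 1) (j + 1) (m - j) ++ (segColB (m - j - 1) (n - j - 1 - 1) (j - 1) ++ segRowB j (m - j - 1 - 1) j)) := by
              intro q h1 h2
              have a1 := (mem_segColF q _ _ _).mp h1
              rcases List.mem_append.mp h2 with h | h
              · have a2 := (mem_segRowF q _ _ _).mp h; omega
              · rcases List.mem_append.mp h with h' | h'
                · have a2 := (mem_segColB q _ _ _).mp h'; omega
                · have a2 := (mem_segRowB q _ _ _).mp h'; omega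
            have hnd : (segColF j j (n - j) ++ (segRowF (n - j - 1) (j + 1) (m - j) ++ (segColB (m - j - 1) (n - j - 1 - 1) (j - 1) ++ segRowB j (m - j - 1 - 1) j))).Nodup :=
              (nodup_segColF j j (n - j)).append
                ((nodup_segRowF (n - j - 1) (j + 1) (m - j)).append
                  ((nodup_segColB (m - j - 1) (n - j - 1 - 1) (j - 1)).append
                    (nodup_segRowB j (m - j - 1 - 1) j) hd34) hd234) hd1234
            have hir : ∀ q ∈ segColF j j (n - j) ++ (segRowF (n - j - 1) (j + 1) (m - j) ++ (segColB (m - j - 1) (n - j - 1 - 1) (j - 1) ++ segRowB j (m - j - 1 - 1) j)), InR M q := by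
              intro q hq
              rcases List.mem_append.mp hq with h | h
              · have a := (mem_segColF q _ _ _).mp h
                exact InR_of_bounds M n m hlen hb q (by omega) (by omega) (by omega) (by omega)
              · rcases List.mem_append.mp h with h' | h'
                · have a := (mem_segRowF q _ _ _).mp h'
                  exact InR_of_bounds M n m hlen hb q (by omega) (by omega) (by omega) (by omega)
                · rcases List.mem_append.mp h' with h'' | h''
                  · have a := (mem_segColB q _ _ _).mp h''
                    exact InR_of_bounds M n m hlen hb q (by omega) (by omega) (by omega) (by omega)
                  · have a := (mem_segRowB q _ _ _).mp h''
                    exact InR_of_bounds M n m hlen hb q (by omega) (by omega) (by omega) (by omega)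
            rw [show (fun p : Int × Int => getCell M p.1 p.2) = readC M from rfl]
            rw [PySem.List.slice_from_neg_one, PySem.List.slice_to_neg_one]
            rw [drop_len_sub_one _ (by
              apply List.ne_nil_of_length_pos
              simp [PySem.List.length_pyRange_one, PySem.List.length_pyRange_neg_one]
              omega) (0 : Int)]
            rw [List.singleton_append]
            rw [chain_eq_writeBack (List.map (fun i => (i, (j : Int))) (PySem.List.pyRange j (n - j) 1) ++ (List.map (fun i => ((n - j - 1 : Int), i)) (PySem.List.pyRange (j + 1) (m - j) 1) ++ (List.map (fun i => (i, m - j - 1)) (PySem.List.pyRange (n - j - 1 - 1) (j - 1) (-1)) ++ List.map (fun i => ((j : Int), i)) (PySem.List.pyRange (m - j - 1 - 1) j (-1))))) M (getCell M j (j + 1)) hnd hir]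
            dsimp only
            rw [zip_trunc _ _ _ (by simp)]
            have hlast : ((List.map (fun i => (i, (j : Int))) (PySem.List.pyRange j (n - j) 1) ++ (List.map (fun i => ((n - j - 1 : Int), i)) (PySem.List.pyRange (j + 1) (m - j) 1) ++ (List.map (fun i => (i, m - j - 1)) (PySem.List.pyRange (n - j - 1 - 1) (j - 1) (-1)) ++ List.map (fun i => ((j : Int), i)) (PySem.List.pyRange (m - j - 1 - 1) j (-1))))).map (readC M)).getLastD 0 = getCell M j (j + 1) := by
              rw [List.map_append, getLastD_append' _ _ _ (by
                apply List.ne_nil_of_length_pos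
                simp [PySem.List.length_pyRange_one, PySem.List.length_pyRange_neg_one]
                omega)]
              rw [List.map_append, getLastD_append' _ _ _ (by
                apply List.ne_nil_of_length_pos
                simp [PySem.List.length_pyRange_one, PySem.List.length_pyRange_neg_one]
                omega)]
              rw [List.map_append]
              by_cases hT4 : j < m - j - 2
              · rw [getLastD_append' _ _ _ (by
                  apply List.ne_nil_of_length_pos
                  simp [PySem.List.length_pyRange_neg_one]
                  omega)]
                rw [List.map_map, getLastD_segB (readC M ∘ fun i => ((j : Int), i)) (m - j - 1 - 1) j (by omega) 0]
                rfl
              · rw [PySem.List.pyRange_neg_one_eq_nil (by omega : m - j - 1 - 1 ≤ j)]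
                simp only [List.map_nil, List.append_nil]
                rw [List.map_map, getLastD_segB (readC M ∘ fun i => (i, m - j - 1)) (n - j - 1 - 1) (j - 1) (by omega) 0]
                simp only [Function.comp_apply]
                rw [show (j : Int) - 1 + 1 = j from by omega, show m - j - 1 = j + 1 from by omega]
                rfl
            rw [hlast]
            rw [show n - j - 1 = n - (j + 1) from by ring, show m - j - 1 = m - (j + 1) from by ring]
            apply ih (j + 1) _ (by omega) (by omega)
            · rw [writeBack_length]; exact hlen
            · refine bound_transfer M _ m (writeBack_length _ _) (fun i hi => writeBack_rowlen _ _ _ hi ?_) hb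
              rintro ⟨q, v⟩ hx
              show 0 ≤ q.1
              have hx1 := (List.of_mem_zip hx).1
              rcases List.mem_append.mp hx1 with h | h
              · have a := (mem_segColF q _ _ _).mp h; omega
              · rcases List.mem_append.mp h with h' | h'
                · have a := (mem_segRowF q _ _ _).mp h'; omega
                · rcases List.mem_append.mp h' with h'' | h''
                  · have a := (mem_segColB q _ _ _).mp h''; omega
                  · have a := (mem_segRowB q _ _ _).mp h''; omega
    · simp only [loopA, loopB]
      rw [if_neg hg, if_neg hg]

-- ===== VERDICT (by name: the statement is the Claim_ definition above) =====
theorem solution_spec : Claim_equal_solution := by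
  intro M hdom hpre
  obtain ⟨hne, hrows⟩ := hpre
  show solution M = solution_alt M
  unfold solution solution_alt
  have hb : ∀ row ∈ M, ((PySem.List.pyGetD M 0 []).length : Int) ≤ (row.length : Int) := by
    intro row hr
    have hh : PySem.List.pyGetD M 0 [] = M.headD [] := by
      cases M with
      | nil => exact absurd rfl hne
      | cons h t => rw [PySem.List.pyGetD_zero_cons]; rfl
    rw [hh]
    exact_mod_cast hrows row hr
  have h := main_loop (M.length : Int) ((PySem.List.pyGetD M 0 []).length : Int) (M.length + 1) 0 M
    (by omega) (le_refl 0) rfl hb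
  rw [sub_zero, sub_zero] at h
  exact h
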